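-- pv_equiv track=rewrite | github.com/oht505/OSU_24Winter_CS325_AnalysisOfAlgorithm | GA/GA2/GA2.py | CrossDP
-- ===== SOURCE A (Python) =====
-- def distance(point1, point2): #Defines a function distance to calculate the Manhattan distance between two points.
--     return abs(point1[0] - point2[0]) + abs(point1[1] - point2[1])
--
-- def CrossDP(P, Q, band_lengths):  #Defines an iterative dynamic programming function CrossDP using a 3D array dp to
--     # store computed results. The array has dimensions len(P) + 1 x len(Q) + 1 x (max(band_lengths) + 1).
--     dp = [[[False] * (max(band_lengths) + 1) for _ in range(len(Q) + 1)] for _ in range(len(P) + 1)]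
--
--     for i in range(len(P) + 1):
--         dp[i][-1][0] = True
--
--     for j in range(len(Q) + 1):
--         dp[-1][j][0] = True
--
--     for i in range(len(P) - 1, -1, -1):
--         for j in range(len(Q) - 1, -1, -1):
--             for band_length in band_lengths:
--                 if band_length >= distance(P[i], Q[j]):
--                     dp[i][j][band_length] = dp[i + 1][j][band_length - distance(P[i], Q[j])] \
--                                             or dp[i][j + 1][band_length - distance(P[i], Q[j])] \
--                                             or dp[i + 1][j + 1][band_length - distance(P[i], Q[j])]
-- #Fills in the dynamic programming array using the recursive relation, considering three possible options at each step.
--     return dp[0][0]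
-- ===== SOURCE B (Python) =====
-- def distance(point1, point2):
--     return abs(point1[0] - point2[0]) + abs(point1[1] - point2[1])
--
-- def CrossDP(P, Q, band_lengths):
--     # Top-down memoized recursion instead of A's bottom-up 3D table:
--     # f(i, j, k) = can a band of remaining length k be placed starting at (i, j)?
--     m = max(band_lengths)
--     bands = set(band_lengths)
--     np_, nq = len(P), len(Q)
--     memo = {}
--     def f(i, j, k):
--         if i == np_ or j == nq:
--             return k == 0
--         d = distance(P[i], Q[j])
--         if not (k in bands and k >= d):
--             return False
--         key = (i, j, k)
--         if key in memo:
--             return memo[key]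
--         res = f(i + 1, j, k - d) or f(i, j + 1, k - d) or f(i + 1, j + 1, k - d)
--         memo[key] = res
--         return res
--     return [f(0, 0, k) for k in range(m + 1)]
-- ===== Notes on version B (the rewrite author's own statement) =====
-- stated objective: faster
-- what changed: B replaces A's bottom-up 3D boolean table ((|P|+1)x(|Q|+1)x(max+1), allocated in full and filled by three nested index loops) with a top-down memoized recursion f(i,j,k) over a dict that only ever stores states whose remaining length is an admissible band length, so the max+1 axis is never materialised; the answer is [f(0,0,k) for k in range(max+1)] sharing one memo.
-- outside the precondition, e.g. on CrossDP([], [], []): A raises ValueError, B raises ValueError; on CrossDP([(0, 0)], [(0, 0)], [-1]): A raises IndexError, B returns []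
import Mathlib
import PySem

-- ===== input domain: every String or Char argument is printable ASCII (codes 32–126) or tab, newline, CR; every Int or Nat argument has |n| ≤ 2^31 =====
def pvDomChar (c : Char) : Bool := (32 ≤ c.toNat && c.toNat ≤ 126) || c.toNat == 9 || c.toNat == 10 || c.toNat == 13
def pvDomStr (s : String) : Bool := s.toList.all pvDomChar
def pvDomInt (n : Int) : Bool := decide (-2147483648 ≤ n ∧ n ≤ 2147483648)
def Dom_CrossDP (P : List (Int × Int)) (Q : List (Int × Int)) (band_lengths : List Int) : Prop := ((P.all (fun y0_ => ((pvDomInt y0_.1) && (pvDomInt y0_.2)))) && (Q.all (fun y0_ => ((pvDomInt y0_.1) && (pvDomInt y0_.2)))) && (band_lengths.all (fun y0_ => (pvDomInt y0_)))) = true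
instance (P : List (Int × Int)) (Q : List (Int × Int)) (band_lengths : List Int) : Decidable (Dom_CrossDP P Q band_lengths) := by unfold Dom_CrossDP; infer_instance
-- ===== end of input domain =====

-- B replaces A's bottom-up 3D boolean table with a top-down memoized recursion over
-- the reachable states only; equal returns proved under Pre_.

-- ===== PORT A =====
-- Manhattan distance (Python helper `distance`)
def pvDist (p q : Int × Int) : Int := |p.1 - q.1| + |p.2 - q.2|

-- dp[i][j][k] read/write (all indices used are in range wherever Python does not raise)
def pvGet3 (dp : List (List (List Bool))) (i j k : Nat) : Bool :=
  ((dp.getD i []).getD j []).getD k false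

def pvSet3 (dp : List (List (List Bool))) (i j k : Nat) (v : Bool) : List (List (List Bool)) :=
  dp.modify i (fun pl => pl.modify j (fun col => col.set k v))

-- `for band_length in band_lengths: …` at fixed (i, j)
def pvBandLoop (P Q : List (Int × Int)) (band_lengths : List Int) (i j : Int)
    (dp : List (List (List Bool))) : List (List (List Bool)) :=
  band_lengths.foldl (fun dp bl =>
    let d := pvDist (P.getD i.toNat (0, 0)) (Q.getD j.toNat (0, 0))
    if d ≤ bl then
      pvSet3 dp i.toNat j.toNat bl.toNat
        (pvGet3 dp (i.toNat + 1) j.toNat (bl - d).toNat ||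
         pvGet3 dp i.toNat (j.toNat + 1) (bl - d).toNat ||
         pvGet3 dp (i.toNat + 1) (j.toNat + 1) (bl - d).toNat)
    else dp) dp

-- `for j in range(len(Q) - 1, -1, -1): …` at fixed i
def pvRowLoop (P Q : List (Int × Int)) (band_lengths : List Int) (i : Int)
    (dp : List (List (List Bool))) : List (List (List Bool)) :=
  (PySem.List.pyRange ((Q.length : Int) - 1) (-1) (-1)).foldl
    (fun dp j => pvBandLoop P Q band_lengths i j dp) dp

def CrossDP (P : List (Int × Int)) (Q : List (Int × Int)) (band_lengths : List Int) : List Bool :=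
  match PySem.List.max? band_lengths id with
  | none => []          -- Python: max([]) raises ValueError (excluded by Pre_)
  | some m =>
    let dp0 : List (List (List Bool)) :=
      List.replicate (P.length + 1) (List.replicate (Q.length + 1) (List.replicate (m + 1).toNat false))
    -- for i in range(len(P)+1): dp[i][-1][0] = True
    let dp1 := (List.range (P.length + 1)).foldl
      (fun dp i => dp.modify i (fun pl => pl.modify (pl.length - 1) (fun col => col.set 0 true))) dp0
    -- for j in range(len(Q)+1): dp[-1][j][0] = True
    let dp2 := (List.range (Q.length + 1)).foldl
      (fun dp j => dp.modify (dp.length - 1) (fun pl => pl.modify j (fun col => col.set 0 true))) dp1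
    -- main triple loop, i descending
    let dp3 := (PySem.List.pyRange ((P.length : Int) - 1) (-1) (-1)).foldl
      (fun dp i => pvRowLoop P Q band_lengths i dp) dp2
    (dp3.getD 0 []).getD 0 []

-- ===== PORT B =====
-- the inner function `f(i, j, k)` of Source B, with the memo dict threaded through
-- (Python mutates one shared dict; here it is passed in and returned).
-- `and`/`or` short-circuits are mirrored by the nested ifs.
def pvBF (P Q : List (Int × Int)) (bands : PySem.Set Int) (i j : Nat) (k : Int)
    (memo : PySem.Dict (Nat × Nat × Int) Bool) :
    Bool × PySem.Dict (Nat × Nat × Int) Bool :=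
  if h : i < P.length ∧ j < Q.length then
    let d := pvDist (P.getD i (0, 0)) (Q.getD j (0, 0))
    if bands.contains k && decide (d ≤ k) then
      match memo.get? (i, j, k) with
      | some v => (v, memo)
      | none =>
        let rm :=
          let r1 := pvBF P Q bands (i + 1) j (k - d) memo
          if r1.1 then r1 else
            let r2 := pvBF P Q bands i (j + 1) (k - d) r1.2
            if r2.1 then r2 else pvBF P Q bands (i + 1) (j + 1) (k - d) r2.2
        (rm.1, rm.2.insert (i, j, k) rm.1)
    else (false, memo)
  else (decide (k = 0), memo)
termination_by (P.length - i) + (Q.length - j)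
decreasing_by all_goals omega

def CrossDP_alt (P : List (Int × Int)) (Q : List (Int × Int)) (band_lengths : List Int) : List Bool :=
  match PySem.List.max? band_lengths id with
  | none => []          -- Python: max([]) raises ValueError (excluded by Pre_)
  | some m =>
    let bands : PySem.Set Int := PySem.Set.ofList band_lengths
    -- `[f(0, 0, k) for k in range(m + 1)]`, one memo shared across the comprehension
    ((PySem.List.pyRange 0 (m + 1) 1).foldl
      (fun st k =>
        let r := pvBF P Q bands 0 0 k st.2
        (st.1 ++ [r.1], r.2))
      (([] : List Bool), (PySem.Dict.empty : PySem.Dict (Nat × Nat × Int) Bool))).1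

-- ===== PRECONDITION & SPEC =====
-- Pre_ excludes exactly the inputs on which A raises: an empty band_lengths (max([]) is a
-- ValueError) and an all-negative band_lengths (the k-dimension is empty, so dp[i][-1][0]
-- is an IndexError).
def Pre_CrossDP (P : List (Int × Int)) (Q : List (Int × Int)) (band_lengths : List Int) : Prop :=
  ∃ x ∈ band_lengths, 0 ≤ x
instance (P : List (Int × Int)) (Q : List (Int × Int)) (band_lengths : List Int) : Decidable (Pre_CrossDP P Q band_lengths) := by unfold Pre_CrossDP; infer_instance

def pvWitness_CrossDP : (List (Int × Int)) × (List (Int × Int)) × List Int :=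
  ([(0, 0), (2, 1)], [(1, 1)], [0, 3])

def Spec_CrossDP (P : List (Int × Int)) (Q : List (Int × Int)) (band_lengths : List Int) (out : List Bool) : Prop := out = CrossDP_alt P Q band_lengths
instance (P : List (Int × Int)) (Q : List (Int × Int)) (band_lengths : List Int) (out : List Bool) : Decidable (Spec_CrossDP P Q band_lengths out) := by unfold Spec_CrossDP; infer_instance

-- ===== CLAIM (what is proved, stated in full; the proofs are below) =====
def Claim_equal_CrossDP : Prop := ∀ (P : List (Int × Int)) (Q : List (Int × Int)) (band_lengths : List Int), Dom_CrossDP P Q band_lengths → Pre_CrossDP P Q band_lengths → Spec_CrossDP P Q band_lengths (CrossDP P Q band_lengths)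


-- ===== LEMMAS AND PROOFS =====

-- the common recursive specification of cell (i, j, k)
def pvCell (P Q : List (Int × Int)) (bl : List Int) (i j : Nat) (k : Int) : Bool :=
  if h : i < P.length ∧ j < Q.length then
    let d := pvDist (P.getD i (0, 0)) (Q.getD j (0, 0))
    (decide (k ∈ bl) && decide (d ≤ k)) &&
      (pvCell P Q bl (i + 1) j (k - d) || pvCell P Q bl i (j + 1) (k - d) ||
       pvCell P Q bl (i + 1) (j + 1) (k - d))
  else decide (k = 0)
termination_by (P.length - i) + (Q.length - j)
decreasing_by all_goals omega

lemma pvDist_nonneg (p q : Int × Int) : 0 ≤ pvDist p q := by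
  unfold pvDist; positivity

lemma pvCell_boundary (P Q : List (Int × Int)) (bl : List Int) (i j : Nat) (k : Int)
    (h : ¬ (i < P.length ∧ j < Q.length)) : pvCell P Q bl i j k = decide (k = 0) := by
  rw [pvCell]; simp [h]

lemma getD_modify' {α : Type} (l : List α) (i a : Nat) (f : α → α) (d : α) :
    (l.modify i f).getD a d = if i = a ∧ a < l.length then f (l.getD a d) else l.getD a d := by
  simp only [List.getD_eq_getElem?_getD, List.getElem?_modify]
  rcases h : l[a]? with _ | x
  · have := List.getElem?_eq_none_iff.mp h
    simp; intro _ h2; omega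
  · have hlt : a < l.length := by
      by_contra hge
      rw [List.getElem?_eq_none (by omega)] at h; cases h
    by_cases hia : i = a <;> simp [hia, hlt]

lemma getD_set' {α : Type} (l : List α) (i a : Nat) (v d : α) :
    (l.set i v).getD a d = if i = a ∧ a < l.length then v else l.getD a d := by
  simp only [List.getD_eq_getElem?_getD, List.getElem?_set]
  split_ifs with h1 h2 h3 <;> simp_all

lemma getD_replicate' {α : Type} (n a : Nat) (x d : α) :
    (List.replicate n x).getD a d = if a < n then x else d := by
  simp [List.getD_eq_getElem?_getD, List.getElem?_replicate]; split <;> simp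

-- shape of the 3D table
def pvShape (dp : List (List (List Bool))) (n1 n2 K : Nat) : Prop :=
  dp.length = n1 ∧ ∀ a, a < n1 →
    (dp.getD a []).length = n2 ∧ ∀ b, b < n2 → ((dp.getD a []).getD b []).length = K

lemma shape_set3 {dp : List (List (List Bool))} {n1 n2 K : Nat} (h : pvShape dp n1 n2 K)
    (i j k : Nat) (v : Bool) : pvShape (pvSet3 dp i j k v) n1 n2 K := by
  obtain ⟨hL, hP⟩ := h
  refine ⟨by simp [pvSet3, List.length_modify, hL], ?_⟩
  intro a ha
  rw [pvSet3, getD_modify']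
  split_ifs with hcond
  · obtain ⟨hP1, hP2⟩ := hP a ha
    refine ⟨by rw [List.length_modify]; exact hP1, ?_⟩
    intro b hb
    rw [getD_modify']
    split_ifs with hc2
    · rw [List.length_set]; exact hP2 b hb
    · exact hP2 b hb
  · exact hP a ha

lemma get3_set3 {dp : List (List (List Bool))} {n1 n2 K : Nat} (h : pvShape dp n1 n2 K)
    {i j k : Nat} (hi : i < n1) (hj : j < n2) (hk : k < K) (v : Bool) (a b c : Nat) :
    pvGet3 (pvSet3 dp i j k v) a b c =
      if i = a ∧ j = b ∧ k = c then v else pvGet3 dp a b c := by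
  obtain ⟨hL, hP⟩ := h
  unfold pvGet3 pvSet3
  rw [getD_modify']
  by_cases hia : i = a
  · subst hia
    obtain ⟨hP1, hP2⟩ := hP i (by omega)
    rw [if_pos ⟨rfl, by omega⟩, getD_modify']
    by_cases hjb : j = b
    · subst hjb
      rw [if_pos ⟨rfl, by omega⟩, getD_set']
      by_cases hkc : k = c
      · subst hkc
        rw [if_pos ⟨rfl, by rw [hP2 j hj]; exact hk⟩, if_pos ⟨rfl, rfl, rfl⟩]
      · rw [if_neg (by tauto), if_neg (by tauto)]
    · rw [if_neg (by tauto), if_neg (by tauto)]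
  · rw [if_neg (by tauto), if_neg (by tauto)]

-- value of every cell once rows > i are final and, in row i, columns ≥ j are final
def pvVal (P Q : List (Int × Int)) (bl : List Int) (i j a b c : Nat) : Bool :=
  if i < a ∨ (i = a ∧ j ≤ b) then pvCell P Q bl a b (c : Int)
  else decide (c = 0 ∧ b = Q.length)

lemma modify_last_eq_set3 (dp : List (List (List Bool))) (n1 n2 K : Nat)
    (h : pvShape dp (n1 + 1) (n2 + 1) K) (i : Nat) (hi : i < n1 + 1) :
    dp.modify i (fun pl => pl.modify (pl.length - 1) (fun col => col.set 0 true)) =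
      pvSet3 dp i n2 0 true := by
  have hpl : (dp.getD i []).length = n2 + 1 := (h.2 i hi).1
  have hd : (dp[i]?.getD (default : List (List Bool))) = dp.getD i [] := by
    simp [List.getD_eq_getElem?_getD]; rfl
  unfold pvSet3
  conv_lhs => rw [List.modify_eq_set]
  conv_rhs => rw [List.modify_eq_set]
  rw [hd, hpl]
  norm_num

lemma shape_dp0 (n1 n2 K : Nat) :
    pvShape (List.replicate (n1 + 1) (List.replicate (n2 + 1) (List.replicate K false)))
      (n1 + 1) (n2 + 1) K := by
  refine ⟨by simp, ?_⟩
  intro a ha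
  rw [getD_replicate', if_pos ha]
  refine ⟨by simp, ?_⟩
  intro b hb
  rw [getD_replicate', if_pos hb]
  simp

lemma get3_dp0 (n1 n2 K : Nat) (a b c : Nat) :
    pvGet3 (List.replicate (n1 + 1) (List.replicate (n2 + 1) (List.replicate K false))) a b c = false := by
  unfold pvGet3
  rw [getD_replicate']
  split_ifs with h1
  · rw [getD_replicate']
    split_ifs with h2
    · rw [getD_replicate']; split_ifs <;> rfl
    · rfl
  · rfl

lemma init1_inv (n1 n2 K : Nat) (hK : 0 < K) :
    ∀ t, t ≤ n1 + 1 →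
    pvShape ((List.range t).foldl
        (fun dp i => dp.modify i (fun pl => pl.modify (pl.length - 1) (fun col => col.set 0 true)))
        (List.replicate (n1 + 1) (List.replicate (n2 + 1) (List.replicate K false))))
      (n1 + 1) (n2 + 1) K ∧
      ∀ a b c, a ≤ n1 → b ≤ n2 → c < K →
        pvGet3 ((List.range t).foldl
          (fun dp i => dp.modify i (fun pl => pl.modify (pl.length - 1) (fun col => col.set 0 true)))
          (List.replicate (n1 + 1) (List.replicate (n2 + 1) (List.replicate K false)))) a b c
          = decide (c = 0 ∧ b = n2 ∧ a < t) := by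
  intro t
  induction t with
  | zero =>
    intro _
    simp only [List.range_zero, List.foldl_nil]
    exact ⟨shape_dp0 n1 n2 K, fun a b c _ _ _ => by simp [get3_dp0]⟩
  | succ t ih =>
    intro ht
    obtain ⟨hS, hv⟩ := ih (by omega)
    simp only [List.range_succ, List.foldl_append, List.foldl_cons, List.foldl_nil]
    rw [modify_last_eq_set3 _ n1 n2 K hS t (by omega)]
    refine ⟨shape_set3 hS _ _ _ _, ?_⟩
    intro a b c ha hb hc
    rw [get3_set3 hS (by omega) (by omega) hK _ a b c, hv a b c ha hb hc]
    split_ifs with hcond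
    · rcases hcond with ⟨rfl, rfl, rfl⟩; simp
    · have : (c = 0 ∧ b = n2 ∧ a < t) ↔ (c = 0 ∧ b = n2 ∧ a < t + 1) := by
        constructor
        · rintro ⟨e1, e2, e3⟩; exact ⟨e1, e2, by omega⟩
        · rintro ⟨e1, e2, e3⟩
          refine ⟨e1, e2, ?_⟩
          rcases Nat.lt_succ_iff_lt_or_eq.mp e3 with h | h
          · exact h
          · exact absurd ⟨h.symm, e2.symm, e1.symm⟩ hcond
      simp only [decide_eq_decide]
      exact this

lemma modify_row_eq_set3 (e : List (List (List Bool))) (n1 n2 K : Nat)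
    (h : pvShape e (n1 + 1) (n2 + 1) K) (t : Nat) :
    e.modify (e.length - 1) (fun pl => pl.modify t (fun col => col.set 0 true)) =
      pvSet3 e n1 t 0 true := by
  have h1 : e.length - 1 = n1 := by rw [h.1]; omega
  rw [h1]; rfl

lemma init2_inv (n1 n2 K : Nat) (hK : 0 < K)
    (dp : List (List (List Bool)))
    (hS : pvShape dp (n1 + 1) (n2 + 1) K)
    (hv : ∀ a b c, a ≤ n1 → b ≤ n2 → c < K →
      pvGet3 dp a b c = decide (c = 0 ∧ b = n2)) :
    ∀ t, t ≤ n2 + 1 →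
    pvShape ((List.range t).foldl
        (fun dp j => dp.modify (dp.length - 1) (fun pl => pl.modify j (fun col => col.set 0 true))) dp)
      (n1 + 1) (n2 + 1) K ∧
      ∀ a b c, a ≤ n1 → b ≤ n2 → c < K →
        pvGet3 ((List.range t).foldl
          (fun dp j => dp.modify (dp.length - 1) (fun pl => pl.modify j (fun col => col.set 0 true))) dp) a b c
          = decide (c = 0 ∧ (b = n2 ∨ (a = n1 ∧ b < t))) := by
  intro t
  induction t with
  | zero =>
    intro _
    simp only [List.range_zero, List.foldl_nil]
    exact ⟨hS, fun a b c ha hb hc => by rw [hv a b c ha hb hc]; simp⟩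
  | succ t ih =>
    intro ht
    obtain ⟨hS', hv'⟩ := ih (by omega)
    simp only [List.range_succ, List.foldl_append, List.foldl_cons, List.foldl_nil]
    rw [modify_row_eq_set3 _ n1 n2 K hS' t]
    refine ⟨shape_set3 hS' _ _ _ _, ?_⟩
    intro a b c ha hb hc
    rw [get3_set3 hS' (by omega) (by omega) hK _ a b c, hv' a b c ha hb hc]
    split_ifs with hcond
    · rcases hcond with ⟨rfl, rfl, rfl⟩; simp
    · have : (c = 0 ∧ (b = n2 ∨ (a = n1 ∧ b < t))) ↔ (c = 0 ∧ (b = n2 ∨ (a = n1 ∧ b < t + 1))) := by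
        constructor
        · rintro ⟨e1, e2 | e3⟩
          · exact ⟨e1, Or.inl e2⟩
          · exact ⟨e1, Or.inr ⟨e3.1, by omega⟩⟩
        · rintro ⟨e1, e2 | e3⟩
          · exact ⟨e1, Or.inl e2⟩
          · rcases Nat.lt_succ_iff_lt_or_eq.mp e3.2 with h | h
            · exact ⟨e1, Or.inr ⟨e3.1, h⟩⟩
            · exact absurd ⟨e3.1.symm, h.symm, e1.symm⟩ hcond
      simp only [decide_eq_decide]
      exact this

-- after the two init loops, the table is pvVal at (len P, 0)
lemma init_inv (P Q : List (Int × Int)) (band_lengths : List Int) (m : Int) (hm0 : 0 ≤ m) :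
    pvShape ((List.range (Q.length + 1)).foldl
        (fun dp j => dp.modify (dp.length - 1) (fun pl => pl.modify j (fun col => col.set 0 true)))
        ((List.range (P.length + 1)).foldl
          (fun dp i => dp.modify i (fun pl => pl.modify (pl.length - 1) (fun col => col.set 0 true)))
          (List.replicate (P.length + 1) (List.replicate (Q.length + 1) (List.replicate (m + 1).toNat false)))))
      (P.length + 1) (Q.length + 1) (m + 1).toNat ∧
      ∀ a b c, a ≤ P.length → b ≤ Q.length → c < (m + 1).toNat →
        pvGet3 ((List.range (Q.length + 1)).foldl
          (fun dp j => dp.modify (dp.length - 1) (fun pl => pl.modify j (fun col => col.set 0 true)))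
          ((List.range (P.length + 1)).foldl
            (fun dp i => dp.modify i (fun pl => pl.modify (pl.length - 1) (fun col => col.set 0 true)))
            (List.replicate (P.length + 1) (List.replicate (Q.length + 1) (List.replicate (m + 1).toNat false)))))
          a b c = pvVal P Q band_lengths P.length 0 a b c := by
  have hK : 0 < (m + 1).toNat := by omega
  obtain ⟨hS1, hv1⟩ := init1_inv P.length Q.length (m + 1).toNat hK (P.length + 1) le_rfl
  have hv1' : ∀ a b c, a ≤ P.length → b ≤ Q.length → c < (m + 1).toNat →
      pvGet3 ((List.range (P.length + 1)).foldl
        (fun dp i => dp.modify i (fun pl => pl.modify (pl.length - 1) (fun col => col.set 0 true)))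
        (List.replicate (P.length + 1) (List.replicate (Q.length + 1) (List.replicate (m + 1).toNat false))))
        a b c = decide (c = 0 ∧ b = Q.length) := by
    intro a b c ha hb hc
    rw [hv1 a b c ha hb hc]
    simp only [decide_eq_decide]
    constructor
    · rintro ⟨e1, e2, _⟩; exact ⟨e1, e2⟩
    · rintro ⟨e1, e2⟩; exact ⟨e1, e2, by omega⟩
  obtain ⟨hS2, hv2⟩ := init2_inv P.length Q.length (m + 1).toNat hK _ hS1 hv1' (Q.length + 1) le_rfl
  refine ⟨hS2, ?_⟩
  intro a b c ha hb hc
  rw [hv2 a b c ha hb hc]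
  unfold pvVal
  by_cases han : a = P.length
  · subst han
    rw [if_pos (Or.inr ⟨rfl, Nat.zero_le _⟩), pvCell_boundary _ _ _ _ _ _ (by omega)]
    have hb' : b < Q.length + 1 := by omega
    simp [hb']
  · rw [if_neg (by omega)]
    simp only [decide_eq_decide]
    constructor
    · rintro ⟨e1, e2 | e3⟩
      · exact ⟨e1, e2⟩
      · exact absurd e3.1 han
    · rintro ⟨e1, e2⟩; exact ⟨e1, Or.inl e2⟩

-- the value of cell (i, j, c) after the band lengths in `done` have been processed
def pvMid (P Q : List (Int × Int)) (bl done : List Int) (i j c : Nat) : Bool :=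
  (decide ((c : Int) ∈ done) &&
     decide (pvDist (P.getD i (0, 0)) (Q.getD j (0, 0)) ≤ (c : Int))) &&
    (pvCell P Q bl (i + 1) j ((c : Int) - pvDist (P.getD i (0, 0)) (Q.getD j (0, 0))) ||
     pvCell P Q bl i (j + 1) ((c : Int) - pvDist (P.getD i (0, 0)) (Q.getD j (0, 0))) ||
     pvCell P Q bl (i + 1) (j + 1) ((c : Int) - pvDist (P.getD i (0, 0)) (Q.getD j (0, 0))))

lemma pvVal_succ_j (P Q : List (Int × Int)) (bl : List Int) (i j a b c : Nat)
    (hne : ¬ (a = i ∧ b = j)) :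
    pvVal P Q bl i (j + 1) a b c = pvVal P Q bl i j a b c := by
  unfold pvVal
  by_cases h1 : i < a
  · simp [h1]
  · by_cases h2 : i = a
    · subst h2
      by_cases h3 : j ≤ b
      · have hbj : b ≠ j := fun e => hne ⟨rfl, e⟩
        have h4 : j + 1 ≤ b := by omega
        simp [h1, h3, h4]
      · have h4 : ¬ (j + 1 ≤ b) := by omega
        simp [h1, h3, h4]
    · simp [h1, h2]

lemma band_fold_aux (P Q : List (Int × Int)) (bl : List Int) (m : Int)
    (i j : Nat) (hi : i < P.length) (hj : j < Q.length) :
    ∀ (todo done : List Int) (dp : List (List (List Bool))),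
    (∀ x ∈ todo, x ≤ m) →
    pvShape dp (P.length + 1) (Q.length + 1) (m + 1).toNat →
    (∀ a b c, a ≤ P.length → b ≤ Q.length → c < (m + 1).toNat →
      pvGet3 dp a b c = if a = i ∧ b = j then pvMid P Q bl done i j c
        else pvVal P Q bl i (j + 1) a b c) →
    pvShape (todo.foldl (fun dp blv =>
        if pvDist (P.getD i (0, 0)) (Q.getD j (0, 0)) ≤ blv then
          pvSet3 dp i j blv.toNat
            (pvGet3 dp (i + 1) j (blv - pvDist (P.getD i (0, 0)) (Q.getD j (0, 0))).toNat ||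
             pvGet3 dp i (j + 1) (blv - pvDist (P.getD i (0, 0)) (Q.getD j (0, 0))).toNat ||
             pvGet3 dp (i + 1) (j + 1) (blv - pvDist (P.getD i (0, 0)) (Q.getD j (0, 0))).toNat)
        else dp) dp) (P.length + 1) (Q.length + 1) (m + 1).toNat ∧
    ∀ a b c, a ≤ P.length → b ≤ Q.length → c < (m + 1).toNat →
      pvGet3 (todo.foldl (fun dp blv =>
        if pvDist (P.getD i (0, 0)) (Q.getD j (0, 0)) ≤ blv then
          pvSet3 dp i j blv.toNat
            (pvGet3 dp (i + 1) j (blv - pvDist (P.getD i (0, 0)) (Q.getD j (0, 0))).toNat ||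
             pvGet3 dp i (j + 1) (blv - pvDist (P.getD i (0, 0)) (Q.getD j (0, 0))).toNat ||
             pvGet3 dp (i + 1) (j + 1) (blv - pvDist (P.getD i (0, 0)) (Q.getD j (0, 0))).toNat)
        else dp) dp) a b c
        = if a = i ∧ b = j then pvMid P Q bl (done ++ todo) i j c
          else pvVal P Q bl i (j + 1) a b c := by
  intro todo
  induction todo with
  | nil =>
    intro done dp _ hS hv
    rw [List.append_nil]
    exact ⟨hS, hv⟩
  | cons blv rest ih =>
    intro done dp hubt hS hv
    simp only [List.foldl_cons]
    have hd0 : 0 ≤ pvDist (P.getD i (0, 0)) (Q.getD j (0, 0)) := pvDist_nonneg _ _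
    rw [show done ++ blv :: rest = (done ++ [blv]) ++ rest by simp]
    by_cases hg : pvDist (P.getD i (0, 0)) (Q.getD j (0, 0)) ≤ blv
    · have hb0 : (0 : Int) ≤ blv := le_trans hd0 hg
      have hbm : blv ≤ m := hubt blv List.mem_cons_self
      rw [if_pos hg]
      have hr1 : pvGet3 dp (i + 1) j (blv - pvDist (P.getD i (0, 0)) (Q.getD j (0, 0))).toNat
          = pvCell P Q bl (i + 1) j (blv - pvDist (P.getD i (0, 0)) (Q.getD j (0, 0))) := by
        rw [hv (i + 1) j _ (by omega) (by omega) (by omega)]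
        rw [if_neg (by simp)]
        unfold pvVal
        rw [if_pos (Or.inl (by omega)), Int.toNat_of_nonneg (by omega)]
      have hr2 : pvGet3 dp i (j + 1) (blv - pvDist (P.getD i (0, 0)) (Q.getD j (0, 0))).toNat
          = pvCell P Q bl i (j + 1) (blv - pvDist (P.getD i (0, 0)) (Q.getD j (0, 0))) := by
        rw [hv i (j + 1) _ (by omega) (by omega) (by omega)]
        rw [if_neg (by simp)]
        unfold pvVal
        rw [if_pos (Or.inr ⟨rfl, le_rfl⟩), Int.toNat_of_nonneg (by omega)]
      have hr3 : pvGet3 dp (i + 1) (j + 1) (blv - pvDist (P.getD i (0, 0)) (Q.getD j (0, 0))).toNat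
          = pvCell P Q bl (i + 1) (j + 1) (blv - pvDist (P.getD i (0, 0)) (Q.getD j (0, 0))) := by
        rw [hv (i + 1) (j + 1) _ (by omega) (by omega) (by omega)]
        rw [if_neg (by simp)]
        unfold pvVal
        rw [if_pos (Or.inl (by omega)), Int.toNat_of_nonneg (by omega)]
      rw [hr1, hr2, hr3]
      apply ih (done ++ [blv]) _ (fun x hx => hubt x (List.mem_cons_of_mem _ hx))
        (shape_set3 hS _ _ _ _)
      intro a b c ha hb hc
      rw [get3_set3 hS (by omega) (by omega) (by omega) _ a b c]
      by_cases hab : a = i ∧ b = j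
      · obtain ⟨rfl, rfl⟩ := hab
        by_cases hcb : c = blv.toNat
        · subst hcb
          rw [if_pos ⟨rfl, rfl, rfl⟩, if_pos ⟨rfl, rfl⟩]
          unfold pvMid
          rw [Int.toNat_of_nonneg hb0]
          have hmem : blv ∈ done ++ [blv] := by simp
          simp [hmem, hg]
          exact fun _ => hg
        · rw [if_neg (fun h => hcb h.2.2.symm), hv a b c ha hb hc, if_pos ⟨rfl, rfl⟩]
          have hce : ¬ ((c : Int) = blv) := by omega
          have hmm : ((c : Int) ∈ done ++ [blv]) ↔ (c : Int) ∈ done := by simp [hce]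
          unfold pvMid
          simp [hmm]
      · rw [if_neg (fun h => hab ⟨h.1.symm, h.2.1.symm⟩), hv a b c ha hb hc,
          if_neg hab, if_neg hab]
    · rw [if_neg hg]
      apply ih (done ++ [blv]) _ (fun x hx => hubt x (List.mem_cons_of_mem _ hx)) hS
      intro a b c ha hb hc
      rw [hv a b c ha hb hc]
      by_cases hab : a = i ∧ b = j
      · rw [if_pos hab, if_pos hab]
        by_cases hce : (c : Int) = blv
        · unfold pvMid
          have hdec : decide (pvDist (P.getD i (0, 0)) (Q.getD j (0, 0)) ≤ blv) = false :=
            decide_eq_false hg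
          rw [hce, hdec]
          simp
        · have hmm : ((c : Int) ∈ done ++ [blv]) ↔ (c : Int) ∈ done := by simp [hce]
          unfold pvMid
          simp [hmm]
      · rw [if_neg hab, if_neg hab]

-- the band loop turns invariant (i, j+1) into invariant (i, j)
lemma band_inv (P Q : List (Int × Int)) (band_lengths : List Int) (m : Int)
    (hub : ∀ x ∈ band_lengths, x ≤ m)
    (i j : Nat) (hi : i < P.length) (hj : j < Q.length)
    (dp : List (List (List Bool)))
    (hS : pvShape dp (P.length + 1) (Q.length + 1) (m + 1).toNat)
    (hv : ∀ a b c, a ≤ P.length → b ≤ Q.length → c < (m + 1).toNat →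
      pvGet3 dp a b c = pvVal P Q band_lengths i (j + 1) a b c) :
    pvShape (pvBandLoop P Q band_lengths (i : Int) (j : Int) dp) (P.length + 1) (Q.length + 1) (m + 1).toNat ∧
    ∀ a b c, a ≤ P.length → b ≤ Q.length → c < (m + 1).toNat →
      pvGet3 (pvBandLoop P Q band_lengths (i : Int) (j : Int) dp) a b c = pvVal P Q band_lengths i j a b c := by
  have hstep : pvBandLoop P Q band_lengths (i : Int) (j : Int) dp
      = band_lengths.foldl (fun dp blv =>
        if pvDist (P.getD i (0, 0)) (Q.getD j (0, 0)) ≤ blv then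
          pvSet3 dp i j blv.toNat
            (pvGet3 dp (i + 1) j (blv - pvDist (P.getD i (0, 0)) (Q.getD j (0, 0))).toNat ||
             pvGet3 dp i (j + 1) (blv - pvDist (P.getD i (0, 0)) (Q.getD j (0, 0))).toNat ||
             pvGet3 dp (i + 1) (j + 1) (blv - pvDist (P.getD i (0, 0)) (Q.getD j (0, 0))).toNat)
        else dp) dp := by
    simp only [pvBandLoop, Int.toNat_natCast]
  rw [hstep]
  have hv' : ∀ a b c, a ≤ P.length → b ≤ Q.length → c < (m + 1).toNat →
      pvGet3 dp a b c = if a = i ∧ b = j then pvMid P Q band_lengths [] i j c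
        else pvVal P Q band_lengths i (j + 1) a b c := by
    intro a b c ha hb hc
    rw [hv a b c ha hb hc]
    by_cases hab : a = i ∧ b = j
    · obtain ⟨rfl, rfl⟩ := hab
      rw [if_pos ⟨rfl, rfl⟩]
      unfold pvVal pvMid
      rw [if_neg (by omega)]
      simp [show b ≠ Q.length from by omega]
    · rw [if_neg hab]
  obtain ⟨hS', hv2⟩ := band_fold_aux P Q band_lengths m i j hi hj band_lengths [] dp hub hS hv'
  refine ⟨hS', ?_⟩
  intro a b c ha hb hc
  rw [hv2 a b c ha hb hc]
  by_cases hab : a = i ∧ b = j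
  · obtain ⟨rfl, rfl⟩ := hab
    rw [if_pos ⟨rfl, rfl⟩]
    unfold pvVal
    rw [if_pos (Or.inr ⟨rfl, le_rfl⟩)]
    rw [pvCell]
    rw [dif_pos ⟨hi, hj⟩]
    simp only [List.nil_append]
    rfl
  · rw [if_neg hab, pvVal_succ_j P Q band_lengths i j a b c hab]

lemma pvVal_top (P Q : List (Int × Int)) (bl : List Int) (i a b c : Nat)
    (hb : b ≤ Q.length) :
    pvVal P Q bl (i + 1) 0 a b c = pvVal P Q bl i Q.length a b c := by
  unfold pvVal
  split_ifs with hA hB hB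
  · rfl
  · exact absurd (Or.inl (by rcases hA with h | h <;> omega)) hB
  · have hba : i = a ∧ b = Q.length := by
      rcases hB with h | h
      · exact absurd (Or.inl (by omega)) hA
      · exact ⟨h.1, by omega⟩
    rw [pvCell_boundary _ _ _ _ _ _ (by omega)]
    simp [hba.2]
  · rfl

-- the inner loop (columns j-1 … 0) finishes row i
lemma row_fold_aux (P Q : List (Int × Int)) (band_lengths : List Int) (m : Int)
    (hub : ∀ x ∈ band_lengths, x ≤ m) (i : Nat) (hi : i < P.length) :
    ∀ (j : Nat), j ≤ Q.length → ∀ (dp : List (List (List Bool))),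
    pvShape dp (P.length + 1) (Q.length + 1) (m + 1).toNat →
    (∀ a b c, a ≤ P.length → b ≤ Q.length → c < (m + 1).toNat →
      pvGet3 dp a b c = pvVal P Q band_lengths i j a b c) →
    pvShape ((PySem.List.pyRange ((j : Int) - 1) (-1) (-1)).foldl
      (fun dp jj => pvBandLoop P Q band_lengths (i : Int) jj dp) dp)
      (P.length + 1) (Q.length + 1) (m + 1).toNat ∧
    ∀ a b c, a ≤ P.length → b ≤ Q.length → c < (m + 1).toNat →
      pvGet3 ((PySem.List.pyRange ((j : Int) - 1) (-1) (-1)).foldl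
        (fun dp jj => pvBandLoop P Q band_lengths (i : Int) jj dp) dp) a b c
        = pvVal P Q band_lengths i 0 a b c := by
  intro j
  induction j with
  | zero =>
    intro _ dp hS hv
    rw [show ((0 : Nat) : Int) - 1 = -1 by norm_num,
      PySem.List.pyRange_neg_one_eq_nil le_rfl]
    exact ⟨hS, hv⟩
  | succ j ih =>
    intro hj dp hS hv
    rw [show ((j + 1 : Nat) : Int) - 1 = (j : Int) by push_cast; ring,
      PySem.List.pyRange_neg_one_cons (by omega), List.foldl_cons]
    obtain ⟨hS2, hv2⟩ := band_inv P Q band_lengths m hub i j hi (by omega) dp hS hv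
    exact ih (by omega) _ hS2 hv2

-- the row loop turns invariant (i+1, 0) into invariant (i, 0)
lemma row_inv (P Q : List (Int × Int)) (band_lengths : List Int) (m : Int)
    (hub : ∀ x ∈ band_lengths, x ≤ m)
    (i : Nat) (hi : i < P.length)
    (dp : List (List (List Bool)))
    (hS : pvShape dp (P.length + 1) (Q.length + 1) (m + 1).toNat)
    (hv : ∀ a b c, a ≤ P.length → b ≤ Q.length → c < (m + 1).toNat →
      pvGet3 dp a b c = pvVal P Q band_lengths (i + 1) 0 a b c) :
    pvShape (pvRowLoop P Q band_lengths (i : Int) dp) (P.length + 1) (Q.length + 1) (m + 1).toNat ∧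
    ∀ a b c, a ≤ P.length → b ≤ Q.length → c < (m + 1).toNat →
      pvGet3 (pvRowLoop P Q band_lengths (i : Int) dp) a b c = pvVal P Q band_lengths i 0 a b c := by
  have hv' : ∀ a b c, a ≤ P.length → b ≤ Q.length → c < (m + 1).toNat →
      pvGet3 dp a b c = pvVal P Q band_lengths i Q.length a b c := by
    intro a b c ha hb hc
    rw [hv a b c ha hb hc]
    exact pvVal_top P Q band_lengths i a b c hb
  exact row_fold_aux P Q band_lengths m hub i hi Q.length le_rfl dp hS hv'

-- full outer loop of A
lemma outer_inv (P Q : List (Int × Int)) (band_lengths : List Int) (m : Int)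
    (hub : ∀ x ∈ band_lengths, x ≤ m) :
    ∀ (i : Nat), i ≤ P.length → ∀ (dp : List (List (List Bool))),
    pvShape dp (P.length + 1) (Q.length + 1) (m + 1).toNat →
    (∀ a b c, a ≤ P.length → b ≤ Q.length → c < (m + 1).toNat →
      pvGet3 dp a b c = pvVal P Q band_lengths i 0 a b c) →
    pvShape ((PySem.List.pyRange ((i : Int) - 1) (-1) (-1)).foldl
      (fun dp i => pvRowLoop P Q band_lengths i dp) dp)
      (P.length + 1) (Q.length + 1) (m + 1).toNat ∧
    ∀ a b c, a ≤ P.length → b ≤ Q.length → c < (m + 1).toNat →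
      pvGet3 ((PySem.List.pyRange ((i : Int) - 1) (-1) (-1)).foldl
        (fun dp i => pvRowLoop P Q band_lengths i dp) dp) a b c
        = pvVal P Q band_lengths 0 0 a b c := by
  intro i
  induction i with
  | zero =>
    intro _ dp hS hv
    rw [show ((0 : Nat) : Int) - 1 = -1 by norm_num,
      PySem.List.pyRange_neg_one_eq_nil le_rfl]
    exact ⟨hS, hv⟩
  | succ i ih =>
    intro hi dp hS hv
    rw [show ((i + 1 : Nat) : Int) - 1 = (i : Int) by push_cast; ring,
      PySem.List.pyRange_neg_one_cons (by omega), List.foldl_cons]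
    have hv' : ∀ a b c, a ≤ P.length → b ≤ Q.length → c < (m + 1).toNat →
        pvGet3 dp a b c = pvVal P Q band_lengths (i + 1) 0 a b c := hv
    obtain ⟨hS2, hv2⟩ := row_inv P Q band_lengths m hub i (by omega) dp hS hv'
    exact ih (by omega) _ hS2 hv2

-- B side: the memo is correct when every stored value is the pvCell value of its key
def pvInv (P Q : List (Int × Int)) (bl : List Int)
    (memo : PySem.Dict (Nat × Nat × Int) Bool) : Prop :=
  ∀ i j k v, memo.get? (i, j, k) = some v → v = pvCell P Q bl i j k

lemma pvInv_empty (P Q : List (Int × Int)) (bl : List Int) :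
    pvInv P Q bl PySem.Dict.empty := by
  intro i j k v h
  rw [PySem.Dict.get?_empty] at h
  cases h

lemma pvInv_insert (P Q : List (Int × Int)) (bl : List Int)
    (memo : PySem.Dict (Nat × Nat × Int) Bool) (hInv : pvInv P Q bl memo)
    (i j : Nat) (k : Int) (v : Bool) (hv : v = pvCell P Q bl i j k) :
    pvInv P Q bl (memo.insert (i, j, k) v) := by
  intro a b c w h
  rw [PySem.Dict.get?_insert] at h
  split_ifs at h with he
  · cases h
    simp only [Prod.mk.injEq] at he
    obtain ⟨rfl, rfl, rfl⟩ := he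
    exact hv
  · exact hInv a b c w h

-- contains on set(band_lengths) is list membership
lemma bands_contains (bl : List Int) (k : Int) :
    (PySem.Set.ofList bl).contains k = decide (k ∈ bl) := by
  rw [Bool.eq_iff_iff]
  simp [PySem.Set.mem_ofList]

-- the memoized recursion computes pvCell and preserves the memo invariant
lemma pvBF_ok (P Q : List (Int × Int)) (bl : List Int) :
    ∀ (n i j : Nat) (k : Int) (memo : PySem.Dict (Nat × Nat × Int) Bool),
    (P.length - i) + (Q.length - j) ≤ n → pvInv P Q bl memo →
    (pvBF P Q (PySem.Set.ofList bl) i j k memo).1 = pvCell P Q bl i j k ∧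
      pvInv P Q bl (pvBF P Q (PySem.Set.ofList bl) i j k memo).2 := by
  intro n
  induction n with
  | zero =>
    intro i j k memo hn hInv
    have hb : ¬ (i < P.length ∧ j < Q.length) := by omega
    rw [pvBF, dif_neg hb, pvCell_boundary _ _ _ _ _ _ hb]
    exact ⟨rfl, hInv⟩
  | succ n ih =>
    intro i j k memo hn hInv
    by_cases hb : i < P.length ∧ j < Q.length
    · rw [pvBF, dif_pos hb]
      simp only
      set d := pvDist (P.getD i (0, 0)) (Q.getD j (0, 0)) with hd
      have hcell : pvCell P Q bl i j k
          = ((decide (k ∈ bl) && decide (d ≤ k)) &&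
             (pvCell P Q bl (i + 1) j (k - d) || pvCell P Q bl i (j + 1) (k - d) ||
              pvCell P Q bl (i + 1) (j + 1) (k - d))) := by
        rw [pvCell, dif_pos hb]
      rw [bands_contains]
      by_cases hc : (decide (k ∈ bl) && decide (d ≤ k)) = true
      · rw [if_pos hc]
        rcases hget : memo.get? (i, j, k) with _ | v
        · simp only
          obtain ⟨h1, hI1⟩ := ih (i + 1) j (k - d) memo (by omega) hInv
          set r1 := pvBF P Q (PySem.Set.ofList bl) (i + 1) j (k - d) memo with hr1
          by_cases ht1 : r1.1 = true
          · rw [if_pos ht1]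
            have hv1 : r1.1 = pvCell P Q bl i j k := by
              rw [ht1, hcell, hc]
              simp [← h1, ht1]
            exact ⟨hv1, pvInv_insert _ _ _ _ hI1 _ _ _ _ hv1⟩
          · rw [if_neg ht1]
            obtain ⟨h2, hI2⟩ := ih i (j + 1) (k - d) r1.2 (by omega) hI1
            set r2 := pvBF P Q (PySem.Set.ofList bl) i (j + 1) (k - d) r1.2 with hr2
            by_cases ht2 : r2.1 = true
            · rw [if_pos ht2]
              have hv2 : r2.1 = pvCell P Q bl i j k := by
                rw [ht2, hcell, hc]
                simp [← h2, ht2]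
              exact ⟨hv2, pvInv_insert _ _ _ _ hI2 _ _ _ _ hv2⟩
            · rw [if_neg ht2]
              obtain ⟨h3, hI3⟩ := ih (i + 1) (j + 1) (k - d) r2.2 (by omega) hI2
              have e1 : pvCell P Q bl (i + 1) j (k - d) = false := by
                rw [← h1]; exact Bool.eq_false_iff.mpr ht1
              have e2 : pvCell P Q bl i (j + 1) (k - d) = false := by
                rw [← h2]; exact Bool.eq_false_iff.mpr ht2
              have hv3 : (pvBF P Q (PySem.Set.ofList bl) (i + 1) (j + 1) (k - d) r2.2).1
                  = pvCell P Q bl i j k := by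
                rw [h3, hcell, hc, e1, e2]
                simp
              exact ⟨hv3, pvInv_insert _ _ _ _ hI3 _ _ _ _ hv3⟩
        · exact ⟨hInv i j k v hget, hInv⟩
      · rw [if_neg hc]
        have hfa : pvCell P Q bl i j k = false := by
          rw [hcell, Bool.eq_false_iff.mpr hc]
          simp
        exact ⟨hfa.symm, hInv⟩
    · rw [pvBF, dif_neg hb, pvCell_boundary _ _ _ _ _ _ hb]
      exact ⟨rfl, hInv⟩

-- the comprehension fold produces the map of pvCell 0 0
lemma foldB_ok (P Q : List (Int × Int)) (bl : List Int) :
    ∀ (L : List Int) (acc : List Bool) (memo : PySem.Dict (Nat × Nat × Int) Bool),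
    pvInv P Q bl memo →
    (L.foldl (fun st k =>
        let r := pvBF P Q (PySem.Set.ofList bl) 0 0 k st.2
        (st.1 ++ [r.1], r.2)) (acc, memo)).1
      = acc ++ L.map (fun k => pvCell P Q bl 0 0 k) := by
  intro L
  induction L with
  | nil => intro acc memo _; simp
  | cons x L ih =>
    intro acc memo hInv
    obtain ⟨h1, hI⟩ := pvBF_ok P Q bl (P.length + Q.length) 0 0 x memo (by omega) hInv
    simp only [List.foldl_cons, List.map_cons]
    rw [ih _ _ hI, h1]
    simp

lemma max?_cons_isSome : ∀ (xs : List Int) (x : Int),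
    ∃ m, PySem.List.max? (x :: xs) id = some m := by
  intro xs
  induction xs with
  | nil => intro x; exact ⟨x, rfl⟩
  | cons y xs ih =>
    intro x
    by_cases h : x < y
    · have he : PySem.List.max? (x :: y :: xs) id = PySem.List.max? (y :: xs) id := by
        unfold PySem.List.max?
        simp only [List.foldl_cons]
        simp [h]
      rw [he]; exact ih y
    · have he : PySem.List.max? (x :: y :: xs) id = PySem.List.max? (x :: xs) id := by
        unfold PySem.List.max?
        simp only [List.foldl_cons]
        simp [h]
      rw [he]; exact ih x

lemma max?_isSome_of_ne_nil (band_lengths : List Int) (h : band_lengths ≠ []) :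
    ∃ m, PySem.List.max? band_lengths id = some m := by
  match band_lengths with
  | [] => exact absurd rfl h
  | x :: xs => exact max?_cons_isSome xs x

-- ===== VERDICT (by name: the statement is the Claim_ definition above) =====
theorem CrossDP_spec : Claim_equal_CrossDP := by
  intro P Q band_lengths hDom hPre
  unfold Spec_CrossDP
  obtain ⟨x, hx, hx0⟩ := hPre
  have hne : band_lengths ≠ [] := by
    intro h; subst h; exact absurd hx (List.not_mem_nil)
  obtain ⟨m, hmx⟩ := max?_isSome_of_ne_nil band_lengths hne
  have hub : ∀ y ∈ band_lengths, y ≤ m := fun y hy => PySem.List.max?_isMax hmx y hy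
  have hm0 : 0 ≤ m := le_trans hx0 (hub x hx)
  -- A side: the final table holds pvCell everywhere
  obtain ⟨hS0, hv0⟩ := init_inv P Q band_lengths m hm0
  obtain ⟨hS3, hv3⟩ := outer_inv P Q band_lengths m hub P.length le_rfl _ hS0 hv0
  -- B side: the comprehension fold is the map of pvCell 0 0
  have hB := foldB_ok P Q band_lengths (PySem.List.pyRange 0 (m + 1) 1) []
    PySem.Dict.empty (pvInv_empty P Q band_lengths)
  simp only [CrossDP, CrossDP_alt, hmx]
  rw [hB, List.nil_append]
  apply List.ext_getElem
  · -- lengths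
    rw [List.length_map, PySem.List.length_pyRange_one]
    have h1 : 0 < P.length + 1 := by omega
    obtain ⟨hpl, hcl⟩ := hS3.2 0 h1
    rw [hcl 0 (by omega)]
    omega
  · intro c hcA hcB
    have hcK : c < (m + 1).toNat := by
      have h1 : 0 < P.length + 1 := by omega
      obtain ⟨hpl, hcl⟩ := hS3.2 0 h1
      rw [hcl 0 (by omega)] at hcA
      exact hcA
    have hvA := hv3 0 0 c (by omega) (by omega) hcK
    unfold pvGet3 at hvA
    unfold pvVal at hvA
    rw [if_pos (Or.inr ⟨rfl, le_rfl⟩)] at hvA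
    rw [List.getD_eq_getElem _ _ hcA] at hvA
    rw [hvA, List.getElem_map, PySem.List.getElem_pyRange_one]
    norm_num
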